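-- pv_equiv track=rewrite | github.com/kousuke008/account_management | account_management/util_tools/cooldown.py | get_wait_time
-- ===== SOURCE A (Python) =====
-- def get_wait_time(distance):
--     # 距離と待機時間の対応表
--     wait_times = [
--         (1, "30秒"),
--         (5, "2分"),
--         (10, "6分"),
--         (25, "11分"),
--         (35, "14分"),
--         (65, "22分"),
--         (81, "25分"),
--         (100, "35分"),
--         (250, "45分"),
--         (500, "1時間"),
--         (750, "1時間15分"),
--         (1000, "1時間30分"),
--         (1500, "2時間"),
--     ]
--
--     # 距離に応じた待機時間を取得
--     for dist, wait_time in wait_times: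
--         if distance <= dist:
--             return wait_time
--     return "2時間以上"
-- ===== SOURCE B (Python) =====
-- import bisect
--
-- _THRESHOLDS = [1, 5, 10, 25, 35, 65, 81, 100, 250, 500, 750, 1000, 1500]
-- _LABELS = ["30秒", "2分", "6分", "11分", "14分", "22分", "25分",
--            "35分", "45分", "1時間", "1時間15分", "1時間30分", "2時間"]
--
--
-- def get_wait_time(distance):
--     i = bisect.bisect_left(_THRESHOLDS, distance)
--     return _LABELS[i] if i < len(_LABELS) else "2時間以上"
-- ===== Notes on version B (the rewrite author's own statement) =====
-- stated objective: idiomatic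
-- what changed: Replaces the linear scan over a list of (threshold, label) pairs with a binary search (bisect_left) over a sorted thresholds list and an indexed lookup into a parallel labels list.
import Mathlib
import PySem

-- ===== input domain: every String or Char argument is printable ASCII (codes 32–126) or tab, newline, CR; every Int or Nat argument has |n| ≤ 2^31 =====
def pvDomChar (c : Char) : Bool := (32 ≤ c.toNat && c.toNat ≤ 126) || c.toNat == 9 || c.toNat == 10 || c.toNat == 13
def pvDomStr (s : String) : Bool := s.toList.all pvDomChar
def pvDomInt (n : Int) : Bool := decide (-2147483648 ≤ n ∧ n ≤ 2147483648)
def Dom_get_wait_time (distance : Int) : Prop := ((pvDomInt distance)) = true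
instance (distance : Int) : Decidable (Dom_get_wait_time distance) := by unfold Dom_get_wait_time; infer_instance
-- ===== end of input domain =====

-- B replaces A's linear scan of (threshold, label) pairs by a bisect-style search over a
-- sorted thresholds list plus an indexed lookup into a parallel labels list (idiomatic; same result).

-- ===== PORT A =====
-- A's table of (threshold, label) pairs
def pvWaitTable : List (Int × String) :=
  [(1, "30秒"), (5, "2分"), (10, "6分"), (25, "11分"), (35, "14分"),
   (65, "22分"), (81, "25分"), (100, "35分"), (250, "45分"), (500, "1時間"),
   (750, "1時間15分"), (1000, "1時間30分"), (1500, "2時間")]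

-- A's for-loop with early return
def pvScan (distance : Int) : List (Int × String) → String
  | [] => "2時間以上"
  | (dist, wait_time) :: rest =>
      if distance ≤ dist then wait_time else pvScan distance rest

def get_wait_time (distance : Int) : String := pvScan distance pvWaitTable

-- ===== PORT B =====
def pvThresholds : List Int := [1, 5, 10, 25, 35, 65, 81, 100, 250, 500, 750, 1000, 1500]
def pvLabels : List String :=
  ["30秒", "2分", "6分", "11分", "14分", "22分", "25分",
   "35分", "45分", "1時間", "1時間15分", "1時間30分", "2時間"]

-- bisect.bisect_left on a sorted list: index of the first element ≥ x
def pvBisectLeft (x : Int) : List Int → Nat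
  | [] => 0
  | t :: rest => if x ≤ t then 0 else 1 + pvBisectLeft x rest

def get_wait_time_alt (distance : Int) : String :=
  let i := pvBisectLeft distance pvThresholds
  (pvLabels[i]?).getD "2時間以上"

-- ===== PRECONDITION & SPEC =====
def Spec_get_wait_time (distance : Int) (out : String) : Prop := out = get_wait_time_alt distance
instance (distance : Int) (out : String) : Decidable (Spec_get_wait_time distance out) := by unfold Spec_get_wait_time; infer_instance

-- ===== CLAIM (what is proved, stated in full; the proofs are below) =====
def Claim_equal_get_wait_time : Prop := ∀ (distance : Int), Dom_get_wait_time distance → Spec_get_wait_time distance (get_wait_time distance)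

-- ===== LEMMAS AND PROOFS =====
theorem pvScan_eq (d : Int) (table : List (Int × String)) :
    pvScan d table
      = ((table.map Prod.snd)[pvBisectLeft d (table.map Prod.fst)]?).getD "2時間以上" := by
  induction table with
  | nil => rfl
  | cons p rest ih =>
    obtain ⟨t, w⟩ := p
    simp only [pvScan, pvBisectLeft, List.map]
    by_cases h : d ≤ t
    · simp [h]
    · rw [Nat.add_comm]
      simp [h, ih, List.getElem?_map]

theorem pv_key (d : Int) : get_wait_time d = get_wait_time_alt d := by
  have h := pvScan_eq d pvWaitTable
  simpa [get_wait_time, get_wait_time_alt, pvWaitTable, pvThresholds, pvLabels] using h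

-- ===== VERDICT (by name: the statement is the Claim_ definition above) =====
theorem get_wait_time_spec : Claim_equal_get_wait_time := by
  intro d _
  unfold Spec_get_wait_time
  exact pv_key d
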